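-- pv_equiv track=rewrite | github.com/gabrielaclemente/CrockerLabMolecularTBI | graphPad.py | parse_brain_name
-- ===== SOURCE A (Python) =====
-- def parse_brain_name(name):
--     parts = name.lower().split("_")
--     return {
--         "Reporter": next((p for p in parts if "mito" in p), "unknown"),
--         "Driver": next((p for p in parts if p in ["repo", "nsyb"]), "unknown"),
--         "Marker": next((p for p in parts if p in ["draper", "stat"]), "unknown"),
--         "Condition": next((p for p in parts if p in ["control", "mild", "moderate", "severe"]), "unknown"),
--         "InjuryType": next((p for p in parts if p in ["single", "double"]), "unknown")
--     }
-- ===== SOURCE B (Python) =====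
-- def parse_brain_name(name):
--     res = {"Reporter": None, "Driver": None, "Marker": None,
--            "Condition": None, "InjuryType": None}
--     for p in name.lower().split("_"):
--         if res["Reporter"] is None and "mito" in p:
--             res["Reporter"] = p
--         if res["Driver"] is None and p in ("repo", "nsyb"):
--             res["Driver"] = p
--         if res["Marker"] is None and p in ("draper", "stat"):
--             res["Marker"] = p
--         if res["Condition"] is None and p in ("control", "mild", "moderate", "severe"):
--             res["Condition"] = p
--         if res["InjuryType"] is None and p in ("single", "double"):
--             res["InjuryType"] = p
--     return {k: ("unknown" if v is None else v) for k, v in res.items()}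
-- ===== Notes on version B (the rewrite author's own statement) =====
-- stated objective: alternative
-- what changed: Replaces five independent first-match scans over the split parts by a single pass that maintains an Option-valued record per category (first match wins), filling in the defaults at the end.
import Mathlib
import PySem

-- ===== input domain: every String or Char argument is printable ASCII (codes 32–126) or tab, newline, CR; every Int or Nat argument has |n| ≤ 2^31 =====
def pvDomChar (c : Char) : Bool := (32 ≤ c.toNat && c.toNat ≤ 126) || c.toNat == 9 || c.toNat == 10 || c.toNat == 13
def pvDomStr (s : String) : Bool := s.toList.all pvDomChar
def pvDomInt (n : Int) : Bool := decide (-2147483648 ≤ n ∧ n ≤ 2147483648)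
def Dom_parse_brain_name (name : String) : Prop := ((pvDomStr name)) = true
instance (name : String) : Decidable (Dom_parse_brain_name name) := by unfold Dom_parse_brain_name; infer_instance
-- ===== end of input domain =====

-- B makes one pass over the parts with Option-valued per-category state instead of A's five
-- separate first-match scans; same return value, similar cost (objective: alternative).

-- category predicates (shared vocabulary of both programs)
def pvIsReporter (p : String) : Bool := PySem.Str.isIn "mito" p
def pvIsDriver (p : String) : Bool := p == "repo" || p == "nsyb"
def pvIsMarker (p : String) : Bool := p == "draper" || p == "stat"
def pvIsCondition (p : String) : Bool :=
  p == "control" || p == "mild" || p == "moderate" || p == "severe"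
def pvIsInjury (p : String) : Bool := p == "single" || p == "double"

-- ===== PORT A =====
def parse_brain_name (name : String) : List (String × String) :=
  let parts := (PySem.Str.split? (PySem.Str.lower name) "_").getD []
  [("Reporter", (parts.find? pvIsReporter).getD "unknown"),
   ("Driver", (parts.find? pvIsDriver).getD "unknown"),
   ("Marker", (parts.find? pvIsMarker).getD "unknown"),
   ("Condition", (parts.find? pvIsCondition).getD "unknown"),
   ("InjuryType", (parts.find? pvIsInjury).getD "unknown")]

-- ===== PORT B =====
-- 'if res[k] is None and pred(p): res[k] = p'
def pvUpd (pred : String → Bool) (o : Option String) (p : String) : Option String :=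
  if o.isNone && pred p then some p else o

abbrev pvState := Option String × Option String × Option String × Option String × Option String

def parse_brain_name_alt (name : String) : List (String × String) :=
  let st := ((PySem.Str.split? (PySem.Str.lower name) "_").getD []).foldl
    (fun (st : pvState) p =>
      (pvUpd pvIsReporter st.1 p, pvUpd pvIsDriver st.2.1 p, pvUpd pvIsMarker st.2.2.1 p,
       pvUpd pvIsCondition st.2.2.2.1 p, pvUpd pvIsInjury st.2.2.2.2 p))
    ((none, none, none, none, none) : pvState)
  [("Reporter", st.1.getD "unknown"),
   ("Driver", st.2.1.getD "unknown"),
   ("Marker", st.2.2.1.getD "unknown"),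
   ("Condition", st.2.2.2.1.getD "unknown"),
   ("InjuryType", st.2.2.2.2.getD "unknown")]

-- ===== PRECONDITION & SPEC =====
def Spec_parse_brain_name (name : String) (out : List (String × String)) : Prop := out = parse_brain_name_alt name
instance (name : String) (out : List (String × String)) : Decidable (Spec_parse_brain_name name out) := by unfold Spec_parse_brain_name; infer_instance

-- ===== CLAIM (what is proved, stated in full; the proofs are below) =====
def Claim_equal_parse_brain_name : Prop := ∀ (name : String), Dom_parse_brain_name name → Spec_parse_brain_name name (parse_brain_name name)

-- ===== LEMMAS AND PROOFS =====

theorem pvUpd_some (pred : String → Bool) (x : String) (ps : List String) :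
    ps.foldl (pvUpd pred) (some x) = some x := by
  induction ps with
  | nil => rfl
  | cons p ps ih => simpa [pvUpd] using ih

theorem pvUpd_find? (pred : String → Bool) (ps : List String) :
    ps.foldl (pvUpd pred) none = ps.find? pred := by
  induction ps with
  | nil => rfl
  | cons p ps ih =>
    by_cases h : pred p = true
    · simp [pvUpd, List.find?, h, pvUpd_some]
    · simp [pvUpd, List.find?, h, ih]

theorem pvFold5 (ps : List String) (st : pvState) :
    ps.foldl
      (fun (st : pvState) p =>
        (pvUpd pvIsReporter st.1 p, pvUpd pvIsDriver st.2.1 p, pvUpd pvIsMarker st.2.2.1 p,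
         pvUpd pvIsCondition st.2.2.2.1 p, pvUpd pvIsInjury st.2.2.2.2 p)) st
    = (ps.foldl (pvUpd pvIsReporter) st.1, ps.foldl (pvUpd pvIsDriver) st.2.1,
       ps.foldl (pvUpd pvIsMarker) st.2.2.1, ps.foldl (pvUpd pvIsCondition) st.2.2.2.1,
       ps.foldl (pvUpd pvIsInjury) st.2.2.2.2) := by
  induction ps generalizing st with
  | nil => rfl
  | cons p ps ih => simp [List.foldl, ih]

-- ===== VERDICT (by name: the statement is the Claim_ definition above) =====
theorem parse_brain_name_spec : Claim_equal_parse_brain_name := by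
  intro name _
  unfold Spec_parse_brain_name parse_brain_name parse_brain_name_alt
  simp [pvFold5, pvUpd_find?]
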